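-- pv_equiv track=rewrite | github.com/thaitranchi/pacman | pacman/map_utils.py | prettify_map
-- ===== SOURCE A (Python) =====
-- def prettify_map(pacman_map):
--     """
--     Transforms a simplified map (*) into a visually accurate
--     bordered map using neighbor detection.
--     """
--     if not isinstance(pacman_map, list):
--         raise TypeError("'pacman_map' must be a list")
--
--     height = len(pacman_map)
--     first_stage = []
--
--     # Stage 1: Basic Border Detection
--     for r in range(height):
--         newline = ""
--         width = len(pacman_map[r])
--         for c in range(width):
--             char = pacman_map[r][c]
--             if char == ".":
--                 newline += "·"
--             elif char == "o":
--                 newline += "•"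
--             elif char == "*":
--                 # Check neighbors (Up, Down, Left, Right)
--                 u = r > 0 and pacman_map[r-1][c] == "*"
--                 d = r < height - 1 and pacman_map[r+1][c] == "*"
--                 l = c > 0 and pacman_map[r][c-1] == "*"
--                 r_side = c < width - 1 and pacman_map[r][c+1] == "*"
--
--                 # Logic for basic corners and lines
--                 if (l or r_side) and not (u or d): newline += "═"
--                 elif (u or d) and not (l or r_side): newline += "║"
--                 elif r_side and d: newline += "╔"
--                 elif l and d: newline += "╗"
--                 elif r_side and u: newline += "╚"
--                 elif l and u: newline += "╝"
--                 else: newline += "═" # Default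
--             else:
--                 newline += char
--         first_stage.append(newline)
--
--     return first_stage
-- ===== SOURCE B (Python) =====
-- # B: index-free rewrite: instead of bounds-checked random access, each row is zipped
-- # with padded shifted copies of the star rows (above/below/left/right) and a 16-entry
-- # glyph table picks the box-drawing character from the neighbor bitmask.
-- _GLYPH = ("═", "═", "═", "═", "║", "╔", "╗", "╔", "║", "╚", "╝", "╚", "║", "╔", "╗", "╔")
--
-- def _pad(bs, n):
--     return (bs + [False] * n)[:n]
--
-- def prettify_map(pacman_map):
--     if not isinstance(pacman_map, list):
--         raise TypeError("'pacman_map' must be a list")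
--     stars = [[ch == "*" for ch in row] for row in pacman_map]
--     out = []
--     for row, srow, up, down in zip(pacman_map, stars, [[]] + stars[:-1], stars[1:] + [[]]):
--         n = len(srow)
--         lefts = [False] + srow[:-1]
--         rights = srow[1:] + [False]
--         chars = []
--         for ch, u, d, l, r in zip(row, _pad(up, n), _pad(down, n), lefts, rights):
--             if ch == ".":
--                 chars.append("·")
--             elif ch == "o":
--                 chars.append("•")
--             elif ch == "*":
--                 chars.append(_GLYPH[8 * u + 4 * d + 2 * l + r])
--             else:
--                 chars.append(ch)
--         out.append("".join(chars))
--     return out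
-- ===== Notes on version B (the rewrite author's own statement) =====
-- stated objective: alternative
-- what changed: Replaces A's bounds-checked random access into the grid by an index-free traversal: each row is zipped with padded shifted copies of the star rows above/below/left/right, and a 16-entry glyph table indexed by the neighbor bitmask replaces the if/elif corner ladder.
import Mathlib
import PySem

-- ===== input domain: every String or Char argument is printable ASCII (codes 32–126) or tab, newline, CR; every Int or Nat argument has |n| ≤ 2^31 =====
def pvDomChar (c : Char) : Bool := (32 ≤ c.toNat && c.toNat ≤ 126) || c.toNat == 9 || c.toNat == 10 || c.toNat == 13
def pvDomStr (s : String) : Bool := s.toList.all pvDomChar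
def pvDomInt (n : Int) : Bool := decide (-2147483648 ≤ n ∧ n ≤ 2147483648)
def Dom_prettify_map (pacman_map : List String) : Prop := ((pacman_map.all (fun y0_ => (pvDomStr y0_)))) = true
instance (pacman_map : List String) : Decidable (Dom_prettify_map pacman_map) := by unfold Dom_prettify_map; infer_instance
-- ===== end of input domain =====

-- B replaces A's bounds-checked random access by an index-free zip of each row with
-- padded shifted copies of the star rows, plus a 16-entry glyph table (same cost).

-- ===== PORT A =====
def prettify_map (pacman_map : List String) : List String :=
  let height : Int := pacman_map.length
  (PySem.List.pyRange 0 height 1).foldl (fun first_stage r =>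
    let row : List Char := (PySem.List.pyGetD pacman_map r "").toList
    let width : Int := row.length
    let newline : List Char := (PySem.List.pyRange 0 width 1).foldl (fun nl c =>
      nl ++ [
        let ch := PySem.List.pyGetD row c ' '
        if ch == '.' then '·'
        else if ch == 'o' then '•'
        else if ch == '*' then
          let u := decide (0 < r) && (PySem.List.pyGetD (PySem.List.pyGetD pacman_map (r-1) "").toList c ' ' == '*')
          let d := decide (r < height - 1) && (PySem.List.pyGetD (PySem.List.pyGetD pacman_map (r+1) "").toList c ' ' == '*')
          let l := decide (0 < c) && (PySem.List.pyGetD row (c-1) ' ' == '*')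
          let rs := decide (c < width - 1) && (PySem.List.pyGetD row (c+1) ' ' == '*')
          if (l || rs) && !(u || d) then '═'
          else if (u || d) && !(l || rs) then '║'
          else if rs && d then '╔'
          else if l && d then '╗'
          else if rs && u then '╚'
          else if l && u then '╝'
          else '═'
        else ch]) []
    first_stage ++ [String.ofList newline]) []

-- ===== PORT B =====
def pvGlyph : List Char := ['═', '═', '═', '═', '║', '╔', '╗', '╔', '║', '╚', '╝', '╚', '║', '╔', '╗', '╔']

-- _pad(bs, n) = (bs + [False]*n)[:n]
def pvPad (bs : List Bool) (n : Nat) : List Bool := (bs ++ List.replicate n false).take n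

-- zip of four / five lists (Python's zip truncates at the shortest)
def pvZip4 {α β γ δ : Type} : List α → List β → List γ → List δ → List (α × β × γ × δ)
  | x :: xs, y :: ys, z :: zs, w :: ws => (x, y, z, w) :: pvZip4 xs ys zs ws
  | _, _, _, _ => []

def pvZip5 {α β γ δ ε : Type} : List α → List β → List γ → List δ → List ε → List (α × β × γ × δ × ε)
  | x :: xs, y :: ys, z :: zs, w :: ws, v :: vs => (x, y, z, w, v) :: pvZip5 xs ys zs ws vs
  | _, _, _, _, _ => []

def prettify_map_alt (pacman_map : List String) : List String :=
  let stars : List (List Bool) := pacman_map.map (fun row => row.toList.map (fun ch => ch == '*'))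
  (pvZip4 pacman_map stars ([] :: stars.dropLast) (stars.drop 1 ++ [[]])).foldl
    (fun out q =>
      let srow := q.2.1
      let n := srow.length
      let lefts : List Bool := false :: srow.dropLast
      let rights : List Bool := srow.drop 1 ++ [false]
      let chars : List Char :=
        (pvZip5 q.1.toList (pvPad q.2.2.1 n) (pvPad q.2.2.2 n) lefts rights).foldl
          (fun cs p =>
            cs ++ [
              if p.1 == '.' then '·'
              else if p.1 == 'o' then '•'
              else if p.1 == '*' then
                pvGlyph.getD (8 * (cond p.2.1 1 0) + 4 * (cond p.2.2.1 1 0)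
                  + 2 * (cond p.2.2.2.1 1 0) + (cond p.2.2.2.2 1 0)) '═'
              else p.1]) []
      out ++ [String.ofList chars]) []

-- ===== PRECONDITION & SPEC =====
-- Pre_ excludes exactly the ragged maps on which A raises IndexError: a '*' cell whose
-- neighboring row above/below is too short to be indexed at that column.
def Pre_prettify_map (pacman_map : List String) : Prop :=
  ∀ r < pacman_map.length, ∀ c < (pacman_map.getD r "").toList.length,
    (pacman_map.getD r "").toList.getD c ' ' = '*' →
      (0 < r → c < (pacman_map.getD (r-1) "").toList.length) ∧
      (r + 1 < pacman_map.length → c < (pacman_map.getD (r+1) "").toList.length)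
instance (pacman_map : List String) : Decidable (Pre_prettify_map pacman_map) := by
  unfold Pre_prettify_map; infer_instance
def pvWitness_prettify_map : List String := ["****", "*.o*", "****"]
def Spec_prettify_map (pacman_map : List String) (out : List String) : Prop := out = prettify_map_alt pacman_map
instance (pacman_map : List String) (out : List String) : Decidable (Spec_prettify_map pacman_map out) := by unfold Spec_prettify_map; infer_instance

-- ===== CLAIM (what is proved, stated in full; the proofs are below) =====
def Claim_equal_prettify_map : Prop := ∀ (pacman_map : List String), Dom_prettify_map pacman_map → Pre_prettify_map pacman_map → Spec_prettify_map pacman_map (prettify_map pacman_map)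

-- ===== LEMMAS AND PROOFS =====

lemma pvZip4_length {α β γ δ : Type} (a : List α) (b : List β) (c : List γ) (d : List δ) :
    (pvZip4 a b c d).length = min a.length (min b.length (min c.length d.length)) := by
  induction a generalizing b c d with
  | nil => cases b <;> cases c <;> cases d <;> simp [pvZip4]
  | cons x xs ih => cases b <;> cases c <;> cases d <;> simp [pvZip4, ih]
lemma pvZip4_getElem? {α β γ δ : Type} (a : List α) (b : List β) (cc : List γ) (d : List δ)
    (i : Nat) (ha : i < a.length) (hb : i < b.length) (hc : i < cc.length) (hd : i < d.length) :
    (pvZip4 a b cc d)[i]? = some (a[i], b[i], cc[i], d[i]) := by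
  induction a generalizing b cc d i with
  | nil => simp at ha
  | cons x xs ih =>
    cases b with | nil => simp at hb | cons y ys =>
    cases cc with | nil => simp at hc | cons z zs =>
    cases d with | nil => simp at hd | cons w ws =>
    cases i with
    | zero => simp [pvZip4]
    | succ j => simp only [pvZip4, List.getElem?_cons_succ, List.getElem_cons_succ]
                exact ih ys zs ws j (by simpa using ha) (by simpa using hb) (by simpa using hc) (by simpa using hd)
lemma pvZip5_length {α β γ δ ε : Type} (a : List α) (b : List β) (c : List γ) (d : List δ) (e : List ε) :
    (pvZip5 a b c d e).length = min a.length (min b.length (min c.length (min d.length e.length))) := by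
  induction a generalizing b c d e with
  | nil => cases b <;> cases c <;> cases d <;> cases e <;> simp [pvZip5]
  | cons x xs ih => cases b <;> cases c <;> cases d <;> cases e <;> simp [pvZip5, ih]
lemma pvZip5_getElem? {α β γ δ ε : Type} (a : List α) (b : List β) (cc : List γ) (d : List δ) (e : List ε)
    (i : Nat) (ha : i < a.length) (hb : i < b.length) (hc : i < cc.length) (hd : i < d.length) (he : i < e.length) :
    (pvZip5 a b cc d e)[i]? = some (a[i], b[i], cc[i], d[i], e[i]) := by
  induction a generalizing b cc d e i with
  | nil => simp at ha
  | cons x xs ih =>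
    cases b with | nil => simp at hb | cons y ys =>
    cases cc with | nil => simp at hc | cons z zs =>
    cases d with | nil => simp at hd | cons w ws =>
    cases e with | nil => simp at he | cons v vs =>
    cases i with
    | zero => simp [pvZip5]
    | succ j => simp only [pvZip5, List.getElem?_cons_succ, List.getElem_cons_succ]
                exact ih ys zs ws vs j (by simpa using ha) (by simpa using hb) (by simpa using hc) (by simpa using hd) (by simpa using he)
lemma pad_getD (bs : List Bool) (n c : Nat) (hc : c < n) :
    (pvPad bs n).getD c false = bs.getD c false := by
  unfold pvPad
  by_cases h : c < bs.length
  · rw [List.getD_eq_getElem _ _ (by simp; omega), List.getElem_take,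
      List.getElem_append_left h, List.getD_eq_getElem _ _ h]
  · rw [List.getD_eq_getElem _ _ (by simp; omega), List.getElem_take,
      List.getElem_append_right (by omega), List.getElem_replicate,
      List.getD_eq_default _ _ (by omega)]
lemma upRow (L : List (List Bool)) (i : Nat) (hi : i < L.length) :
    ([] :: L.dropLast).getD i [] = if i = 0 then [] else L.getD (i-1) [] := by
  cases i with
  | zero => simp
  | succ j =>
    simp only [List.getD_cons_succ, Nat.succ_ne_zero, if_false, Nat.add_sub_cancel]
    rw [List.getD_eq_getElem _ _ (by simp; omega), List.getElem_dropLast,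
      List.getD_eq_getElem _ _ (by omega)]
lemma downRow (L : List (List Bool)) (i : Nat) (hi : i < L.length) :
    (L.drop 1 ++ [[]]).getD i [] = if i+1 < L.length then L.getD (i+1) [] else [] := by
  by_cases h : i + 1 < L.length
  · rw [List.getD_eq_getElem _ _ (by simp; omega), List.getElem_append_left (by simp; omega),
      List.getElem_drop, List.getD_eq_getElem _ _ (by omega), if_pos h]
    congr 1; omega
  · rw [List.getD_eq_getElem _ _ (by simp; omega), List.getElem_append_right (by simp; omega),
      if_neg h]
    simp
lemma lefts_getD (s : List Bool) (c : Nat) (hc : c < s.length) :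
    (false :: s.dropLast).getD c false = if c = 0 then false else s.getD (c-1) false := by
  cases c with
  | zero => simp
  | succ j =>
    simp only [List.getD_cons_succ, Nat.succ_ne_zero, if_false, Nat.add_sub_cancel]
    rw [List.getD_eq_getElem _ _ (by simp; omega), List.getElem_dropLast,
      List.getD_eq_getElem _ _ (by omega)]
lemma rights_getD (s : List Bool) (c : Nat) (hc : c < s.length) :
    (s.drop 1 ++ [false]).getD c false = if c+1 < s.length then s.getD (c+1) false else false := by
  by_cases h : c + 1 < s.length
  · rw [List.getD_eq_getElem _ _ (by simp; omega), List.getElem_append_left (by simp; omega),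
      List.getElem_drop, List.getD_eq_getElem _ _ (by omega), if_pos h]
    congr 1; omega
  · rw [List.getD_eq_getElem _ _ (by simp; omega), List.getElem_append_right (by simp; omega),
      if_neg h]
    simp
lemma ladder_eq_glyph (u d l rs : Bool) :
    (if (l || rs) && !(u || d) then '═'
     else if (u || d) && !(l || rs) then '║'
     else if rs && d then '╔'
     else if l && d then '╗'
     else if rs && u then '╚'
     else if l && u then '╝'
     else '═')
    = pvGlyph.getD (8 * (cond u 1 0) + 4 * (cond d 1 0) + 2 * (cond l 1 0) + (cond rs 1 0)) '═' := by
  cases u <;> cases d <;> cases l <;> cases rs <;> decide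

lemma getD_star (l : List Char) (c : Nat) :
    (l.map (fun ch => ch == '*')).getD c false = (l.getD c ' ' == '*') := by
  by_cases h : c < l.length
  · rw [List.getD_eq_getElem _ _ (by simpa), List.getElem_map, List.getD_eq_getElem _ _ h]
  · rw [List.getD_eq_default _ _ (by simpa using h), List.getD_eq_default _ _ (by omega)]
    rfl

-- ===== VERDICT (by name: the statement is the Claim_ definition above) =====
theorem prettify_map_spec : Claim_equal_prettify_map := by
  intro m _ _
  unfold Spec_prettify_map prettify_map prettify_map_alt
  simp only [PySem.List.foldl_append_singleton_eq_map, List.nil_append]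
  apply List.ext_getElem
  · simp [pvZip4_length, PySem.List.length_pyRange_one]
    omega
  · intro i h1 h2
    have hi : i < m.length := by
      have h2' := h2
      simp [pvZip4_length] at h2'
      omega
    simp only [List.getElem_map]
    rw [PySem.List.getElem_pyRange_one]
    have hz : (pvZip4 m (m.map (fun row => row.toList.map (fun ch => ch == '*')))
        ([] :: (m.map (fun row => row.toList.map (fun ch => ch == '*'))).dropLast)
        ((m.map (fun row => row.toList.map (fun ch => ch == '*'))).drop 1 ++ [[]]))[i]'(by rw [pvZip4_length]; simp; omega)
        = (m[i], m[i].toList.map (fun ch => ch == '*'),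
           (if i = 0 then [] else (m.getD (i-1) "").toList.map (fun ch => ch == '*')),
           (if i + 1 < m.length then (m.getD (i+1) "").toList.map (fun ch => ch == '*') else [])) := by
      have h := pvZip4_getElem? m (m.map (fun row => row.toList.map (fun ch => ch == '*')))
        ([] :: (m.map (fun row => row.toList.map (fun ch => ch == '*'))).dropLast)
        ((m.map (fun row => row.toList.map (fun ch => ch == '*'))).drop 1 ++ [[]])
        i hi (by simp [hi]) (by simp; omega) (by simp; omega)
      rw [List.getElem?_eq_getElem (by rw [pvZip4_length]; simp; omega), Option.some_inj] at h
      rw [h, List.getElem_map]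
      refine congrArg _ (congrArg _ ?_)
      refine congrArg₂ Prod.mk ?_ ?_
      · rw [← List.getD_eq_getElem _ ([] : List Bool) _, upRow _ _ (by simpa using hi)]
        by_cases h0 : i = 0
        · simp [h0]
        · rw [if_neg h0, if_neg h0]
          rw [List.getD_eq_getElem _ _ (by simp; omega), List.getElem_map,
            List.getD_eq_getElem _ _ (by omega)]
      · rw [← List.getD_eq_getElem _ ([] : List Bool) _, downRow _ _ (by simpa using hi)]
        by_cases h1 : i + 1 < m.length
        · rw [if_pos (by simpa using h1), if_pos h1]
          rw [List.getD_eq_getElem _ _ (by simp; omega), List.getElem_map,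
            List.getD_eq_getElem _ _ (by omega)]
        · rw [if_neg (by simpa using h1), if_neg h1]
    rw [hz]
    simp only [zero_add, PySem.List.pyGetD_natCast]
    rw [show m.getD i "" = m[i] from List.getD_eq_getElem _ _ hi]
    congr 1
    apply List.ext_getElem
    · simp [pvZip5_length, pvPad, PySem.List.length_pyRange_one]
      omega
    · intro c hc1 hc2
      have hcl : c < m[i].toList.length := by
        have hc1' := hc1
        simp [PySem.List.length_pyRange_one] at hc1'
        simpa using hc1'
      have hlen : m[i].toList.length = m[i].length := by simp
      simp only [List.getElem_map]
      rw [PySem.List.getElem_pyRange_one]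
      have hz5 : (pvZip5 m[i].toList
          (pvPad (if i = 0 then [] else (m.getD (i-1) "").toList.map (fun ch => ch == '*')) (m[i].toList.map (fun ch => ch == '*')).length)
          (pvPad (if i + 1 < m.length then (m.getD (i+1) "").toList.map (fun ch => ch == '*') else []) (m[i].toList.map (fun ch => ch == '*')).length)
          (false :: (m[i].toList.map (fun ch => ch == '*')).dropLast)
          ((m[i].toList.map (fun ch => ch == '*')).drop 1 ++ [false]))[c]'(by rw [pvZip5_length]; simp [pvPad]; omega)
          = (m[i].toList[c],
             (if i = 0 then false else ((m.getD (i-1) "").toList.getD c ' ' == '*')),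
             (if i + 1 < m.length then ((m.getD (i+1) "").toList.getD c ' ' == '*') else false),
             (if c = 0 then false else (m[i].toList.getD (c-1) ' ' == '*')),
             (if c + 1 < m[i].toList.length then (m[i].toList.getD (c+1) ' ' == '*') else false)) := by
        have h := pvZip5_getElem? m[i].toList
          (pvPad (if i = 0 then [] else (m.getD (i-1) "").toList.map (fun ch => ch == '*')) (m[i].toList.map (fun ch => ch == '*')).length)
          (pvPad (if i + 1 < m.length then (m.getD (i+1) "").toList.map (fun ch => ch == '*') else []) (m[i].toList.map (fun ch => ch == '*')).length)
          (false :: (m[i].toList.map (fun ch => ch == '*')).dropLast)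
          ((m[i].toList.map (fun ch => ch == '*')).drop 1 ++ [false])
          c hcl (by simp [pvPad]; omega) (by simp [pvPad]; omega) (by simp; omega) (by simp; omega)
        rw [List.getElem?_eq_getElem (by rw [pvZip5_length]; simp [pvPad]; omega), Option.some_inj] at h
        rw [h]
        refine congrArg _ ?_
        refine congrArg₂ Prod.mk ?_ (congrArg₂ Prod.mk ?_ (congrArg₂ Prod.mk ?_ ?_))
        · rw [← List.getD_eq_getElem _ false _, pad_getD _ _ _ (by simpa using hcl)]
          by_cases h0 : i = 0
          · simp [h0]
          · rw [if_neg h0, if_neg h0, getD_star]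
        · rw [← List.getD_eq_getElem _ false _, pad_getD _ _ _ (by simpa using hcl)]
          by_cases h1 : i + 1 < m.length
          · rw [if_pos h1, if_pos h1, getD_star]
          · rw [if_neg h1, if_neg h1]
            simp
        · rw [← List.getD_eq_getElem _ false _, lefts_getD _ _ (by simpa using hcl)]
          by_cases h0 : c = 0
          · simp [h0]
          · rw [if_neg h0, if_neg h0, getD_star]
        · rw [← List.getD_eq_getElem _ false _, rights_getD _ _ (by simpa using hcl)]
          by_cases h1 : c + 1 < (m[i].toList.map (fun ch => ch == '*')).length
          · rw [if_pos h1, if_pos (by simpa using h1), getD_star]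
          · rw [if_neg h1, if_neg (by simpa using h1)]
      rw [hz5]
      simp only [zero_add]
      have hch : PySem.List.pyGetD m[i].toList (c : Int) ' ' = m[i].toList[c] := by
        rw [PySem.List.pyGetD_natCast, List.getD_eq_getElem _ _ hcl]
      have hu : (decide (0 < (i : Int)) && (PySem.List.pyGetD (PySem.List.pyGetD m ((i : Int) - 1) "").toList (c : Int) ' ' == '*'))
          = (if i = 0 then false else ((m.getD (i-1) "").toList.getD c ' ' == '*')) := by
        cases i with
        | zero => simp
        | succ j =>
          rw [show ((((j+1 : Nat)) : Int) - 1) = ((j : Nat) : Int) by push_cast; ring]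
          simp only [PySem.List.pyGetD_natCast]
          rw [decide_eq_true (show (0 : Int) < (((j+1 : Nat)) : Int) by positivity), Bool.true_and,
            if_neg (Nat.succ_ne_zero j), Nat.add_sub_cancel]
      have hd : (decide ((i : Int) < (m.length : Int) - 1) && (PySem.List.pyGetD (PySem.List.pyGetD m ((i : Int) + 1) "").toList (c : Int) ' ' == '*'))
          = (if i + 1 < m.length then ((m.getD (i+1) "").toList.getD c ' ' == '*') else false) := by
        by_cases h1 : i + 1 < m.length
        · rw [show (((i : Nat) : Int) + 1) = (((i+1 : Nat)) : Int) by push_cast; ring, if_pos h1]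
          simp only [PySem.List.pyGetD_natCast]
          rw [decide_eq_true (show ((i : Nat) : Int) < (m.length : Int) - 1 by omega), Bool.true_and]
        · rw [if_neg h1,
            decide_eq_false (show ¬ (((i : Nat) : Int) < (m.length : Int) - 1) by omega), Bool.false_and]
      have hl : (decide (0 < (c : Int)) && (PySem.List.pyGetD m[i].toList ((c : Int) - 1) ' ' == '*'))
          = (if c = 0 then false else (m[i].toList.getD (c-1) ' ' == '*')) := by
        cases c with
        | zero => simp
        | succ j =>
          rw [show ((((j+1 : Nat)) : Int) - 1) = ((j : Nat) : Int) by push_cast; ring]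
          simp only [PySem.List.pyGetD_natCast]
          rw [decide_eq_true (show (0 : Int) < (((j+1 : Nat)) : Int) by positivity), Bool.true_and,
            if_neg (Nat.succ_ne_zero j), Nat.add_sub_cancel]
      have hr : (decide ((c : Int) < (m[i].toList.length : Int) - 1) && (PySem.List.pyGetD m[i].toList ((c : Int) + 1) ' ' == '*'))
          = (if c + 1 < m[i].toList.length then (m[i].toList.getD (c+1) ' ' == '*') else false) := by
        by_cases h1 : c + 1 < m[i].toList.length
        · rw [show (((c : Nat) : Int) + 1) = (((c+1 : Nat)) : Int) by push_cast; ring, if_pos h1]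
          simp only [PySem.List.pyGetD_natCast]
          rw [decide_eq_true (show ((c : Nat) : Int) < (m[i].toList.length : Int) - 1 by omega), Bool.true_and]
        · rw [if_neg h1,
            decide_eq_false (show ¬ (((c : Nat) : Int) < (m[i].toList.length : Int) - 1) by omega), Bool.false_and]
      rw [hch, hu, hd, hl, hr]
      by_cases k1 : (m[i].toList[c] == '.') = true
      · rw [if_pos k1, if_pos k1]
      · rw [if_neg k1, if_neg k1]
        by_cases k2 : (m[i].toList[c] == 'o') = true
        · rw [if_pos k2, if_pos k2]
        · rw [if_neg k2, if_neg k2]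
          by_cases k3 : (m[i].toList[c] == '*') = true
          · rw [if_pos k3, if_pos k3]
            exact ladder_eq_glyph _ _ _ _
          · rw [if_neg k3, if_neg k3]
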